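-- pv_equiv track=rewrite | github.com/TheNSNick/NChess | v1/chess2.py | diagonal_moves
-- ===== SOURCE A (Python) =====
-- def diagonal_moves(coords, board, player):
--     moves = []
--     x, y = coords
--     # up-left
--     for i in range(min(x, y)):
--         if (x - i - 1, y - i - 1) not in board.keys():
--             moves.append((x - i - 1, y - i - 1))
--         else:
--             if board[(x - i - 1, y - i - 1)][0] != player:
--                 moves.append((x - i - 1, y - i - 1))
--             break
--     # up-right
--     for i in range(min(7-x, y)):
--         if (x + i + 1, y - i - 1) not in board.keys():
--             moves.append((x + i + 1, y - i - 1))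
--         else:
--             if board[(x + i + 1, y - i - 1)][0] != player:
--                 moves.append((x + i + 1, y - i - 1))
--             break
--     # down-left
--     for i in range(min(x, 7-y)):
--         if (x - i - 1, y + i + 1) not in board.keys():
--             moves.append((x - i - 1, y + i + 1))
--         else:
--             if board[(x - i - 1, y + i + 1)][0] != player:
--                 moves.append((x - i - 1, y + i + 1))
--             break
--     # down-right
--     for i in range(min(7-x, 7-y)):
--         if (x + i + 1, y + i + 1) not in board.keys():
--             moves.append((x + i + 1, y + i + 1))
--         else:
--             if board[(x + i + 1, y + i + 1)][0] != player:
--                 moves.append((x + i + 1, y + i + 1))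
--             break
--     return moves
-- ===== SOURCE B (Python) =====
-- def diagonal_moves(coords, board, player):
--     x, y = coords
--     moves = []
--     for dx, dy in ((-1, -1), (1, -1), (-1, 1), (1, 1)):
--         edge = min(x if dx < 0 else 7 - x, y if dy < 0 else 7 - y)
--         # nearest piece on this ray, found by scanning the piece list (not by probing squares)
--         best = None
--         for (px, py), piece in board.items():
--             t = dx * (px - x)
--             if t >= 1 and t <= edge and dy * (py - y) == t and (best is None or t < best[0]):
--                 best = (t, piece)
--         if best is None:
--             moves += [(x + dx * t, y + dy * t) for t in range(1, edge + 1)]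
--         else:
--             t0, piece = best
--             moves += [(x + dx * t, y + dy * t) for t in range(1, t0)]
--             if piece[0] != player:
--                 moves.append((x + dx * t0, y + dy * t0))
--     return moves
-- ===== Notes on version B (the rewrite author's own statement) =====
-- stated objective: alternative
-- what changed: Instead of probing successive squares against the dict and breaking at a blocker, B scans the piece list once per direction to find the nearest blocker on the ray arithmetically, then emits the free squares by a range comprehension plus the blocker square if it is an enemy.
import Mathlib
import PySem

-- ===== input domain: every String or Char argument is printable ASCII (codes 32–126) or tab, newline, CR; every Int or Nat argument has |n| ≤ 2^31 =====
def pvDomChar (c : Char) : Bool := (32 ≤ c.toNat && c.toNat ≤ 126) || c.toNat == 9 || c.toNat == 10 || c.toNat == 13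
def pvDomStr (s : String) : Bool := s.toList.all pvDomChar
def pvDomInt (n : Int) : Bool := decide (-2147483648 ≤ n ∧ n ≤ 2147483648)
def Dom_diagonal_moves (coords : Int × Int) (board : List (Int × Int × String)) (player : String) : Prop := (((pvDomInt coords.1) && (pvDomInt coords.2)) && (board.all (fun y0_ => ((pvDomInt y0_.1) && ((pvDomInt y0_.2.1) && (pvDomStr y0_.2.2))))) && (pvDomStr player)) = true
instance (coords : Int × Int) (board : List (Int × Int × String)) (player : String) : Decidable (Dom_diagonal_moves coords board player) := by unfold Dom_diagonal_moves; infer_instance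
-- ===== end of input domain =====

-- B locates the nearest blocker on each diagonal by one scan of the piece list, then emits
-- the ray by a range comprehension, instead of A's square-by-square probing with break
-- (objective: alternative); same return values on Pre_.


-- ===== PORT A =====
-- '(a,b) in board.keys()' / 'board[(a,b)]': first match in the association list
def pvLookupA (board : List (Int × Int × String)) (c : Int × Int) : Option String :=
  (board.find? (fun e => e.1 == c.1 && e.2.1 == c.2)).map (·.2.2)

-- one of A's 'for i in range(…): … break' blocks, over the materialised range list;
-- 'none' of pyGet? (board value "") is where Python raises IndexError — outside Pre_
def pvRayA (board : List (Int × Int × String)) (player : String)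
    (pos : Int → Int × Int) : List Int → List (Int × Int)
  | [] => []
  | i :: rest =>
    match pvLookupA board (pos i) with
    | none => pos i :: pvRayA board player pos rest
    | some s =>
      match PySem.Str.pyGet? s 0 with
      | some ch => if String.ofList [ch] ≠ player then [pos i] else []
      | none => []

def diagonal_moves (coords : Int × Int) (board : List (Int × Int × String)) (player : String) : List (Int × Int) :=
  let x := coords.1
  let y := coords.2
  pvRayA board player (fun i => (x - i - 1, y - i - 1)) (PySem.List.pyRange 0 (min x y) 1)
  ++ pvRayA board player (fun i => (x + i + 1, y - i - 1)) (PySem.List.pyRange 0 (min (7 - x) y) 1)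
  ++ pvRayA board player (fun i => (x - i - 1, y + i + 1)) (PySem.List.pyRange 0 (min x (7 - y)) 1)
  ++ pvRayA board player (fun i => (x + i + 1, y + i + 1)) (PySem.List.pyRange 0 (min (7 - x) (7 - y)) 1)

-- ===== PORT B =====
-- B's inner 'for (px, py), piece in board.items(): …' loop tracking the nearest eligible
-- piece (smallest t, first one wins ties), transliterated with the accumulator 'best'
def pvBest (cx cy dx dy edge : Int) : List (Int × Int × String) → Option (Int × String) → Option (Int × String)
  | [], best => best
  | e :: rest, best =>
    let t := dx * (e.1 - cx)
    if 1 ≤ t ∧ t ≤ edge ∧ dy * (e.2.1 - cy) = t then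
      match best with
      | none => pvBest cx cy dx dy edge rest (some (t, e.2.2))
      | some p =>
        if t < p.1 then pvBest cx cy dx dy edge rest (some (t, e.2.2))
        else pvBest cx cy dx dy edge rest best
    else pvBest cx cy dx dy edge rest best

-- one direction of B: find the nearest blocker, then generate the squares by comprehension;
-- 'none' of pyGet? (piece "") is where B's Python raises IndexError — outside Pre_
def pvDirB (board : List (Int × Int × String)) (player : String)
    (x y dx dy edge : Int) : List (Int × Int) :=
  match pvBest x y dx dy edge board none with
  | none => (PySem.List.pyRange 1 (edge + 1) 1).map (fun t => (x + dx * t, y + dy * t))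
  | some (t0, s) =>
    (PySem.List.pyRange 1 t0 1).map (fun t => (x + dx * t, y + dy * t)) ++
    (match PySem.Str.pyGet? s 0 with
     | some ch => if String.ofList [ch] ≠ player then [(x + dx * t0, y + dy * t0)] else []
     | none => [])

def diagonal_moves_alt (coords : Int × Int) (board : List (Int × Int × String)) (player : String) : List (Int × Int) :=
  [((-1 : Int), (-1 : Int)), (1, -1), (-1, 1), (1, 1)].foldl
    (fun moves d =>
      let edge := min (if d.1 < 0 then coords.1 else 7 - coords.1)
                      (if d.2 < 0 then coords.2 else 7 - coords.2)
      moves ++ pvDirB board player coords.1 coords.2 d.1 d.2 edge) []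

-- ===== PRECONDITION & SPEC =====
-- first value stored under key (a, b) in the association list (dict lookup)
def pvVal (board : List (Int × Int × String)) (a b : Int) : Option String :=
  (board.find? (fun e => e.1 == a && e.2.1 == b)).map (·.2.2)

-- Pre_ excludes exactly the inputs on which A raises IndexError: a board square holding the
-- empty string that is the first occupied square, within A's range bounds, on one of the four
-- diagonal rays from coords (B's piece[0] raises there identically).
def Pre_diagonal_moves (coords : Int × Int) (board : List (Int × Int × String)) (player : String) : Prop :=
  ∀ e ∈ board, ∀ sx ∈ [(1 : Int), -1], ∀ sy ∈ [(1 : Int), -1],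
    ¬ (e.2.2 = "" ∧ sx * (e.1 - coords.1) = sy * (e.2.1 - coords.2) ∧
       1 ≤ sx * (e.1 - coords.1) ∧
       sx * (e.1 - coords.1) ≤ min (if sx = -1 then coords.1 else 7 - coords.1)
                                   (if sy = -1 then coords.2 else 7 - coords.2) ∧
       pvVal board e.1 e.2.1 = some "" ∧
       ∀ e' ∈ board, ¬ (sx * (e'.1 - coords.1) = sy * (e'.2.1 - coords.2) ∧
                        1 ≤ sx * (e'.1 - coords.1) ∧
                        sx * (e'.1 - coords.1) < sx * (e.1 - coords.1)))
instance (coords : Int × Int) (board : List (Int × Int × String)) (player : String) : Decidable (Pre_diagonal_moves coords board player) := by unfold Pre_diagonal_moves; infer_instance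

def pvWitness_diagonal_moves : (Int × Int) × (List (Int × Int × String)) × String :=
  ((4, 4), [(6, 6, "bQ"), (2, 2, "wP")], "w")

def Spec_diagonal_moves (coords : Int × Int) (board : List (Int × Int × String)) (player : String) (out : List (Int × Int)) : Prop := out = diagonal_moves_alt coords board player
instance (coords : Int × Int) (board : List (Int × Int × String)) (player : String) (out : List (Int × Int)) : Decidable (Spec_diagonal_moves coords board player out) := by unfold Spec_diagonal_moves; infer_instance

-- ===== CLAIM (what is proved, stated in full; the proofs are below) =====
def Claim_equal_diagonal_moves : Prop := ∀ (coords : Int × Int) (board : List (Int × Int × String)) (player : String), Dom_diagonal_moves coords board player → Pre_diagonal_moves coords board player → Spec_diagonal_moves coords board player (diagonal_moves coords board player)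

-- ===== LEMMAS AND PROOFS =====

-- proof-side intermediate: A's walk with an explicit step count (fuel) instead of the range list
def pvWalk (board : List (Int × Int × String)) (player : String)
    (dx dy : Int) : Nat → Int → Int → List (Int × Int)
  | 0, _, _ => []
  | n + 1, cx, cy =>
    match pvLookupA board (cx + dx, cy + dy) with
    | none => (cx + dx, cy + dy) :: pvWalk board player dx dy n (cx + dx) (cy + dy)
    | some s =>
      match PySem.Str.pyGet? s 0 with
      | some ch => if String.ofList [ch] ≠ player then [(cx + dx, cy + dy)] else []
      | none => []

-- A's range-indexed ray equals the counted walk, for any direction (dx, dy)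
lemma ray_eq_walk (board : List (Int × Int × String)) (player : String)
    (dx dy x y : Int) (k : Nat) : ∀ a : Int,
    pvRayA board player (fun i => (x + dx * (i + 1), y + dy * (i + 1)))
        (PySem.List.pyRange a (a + (k : Int)) 1)
      = pvWalk board player dx dy k (x + dx * a) (y + dy * a) := by
  induction k with
  | zero =>
    intro a
    rw [show (a + ((0 : Nat) : Int)) = a by simp,
        PySem.List.pyRange_one_eq_nil (le_refl a)]
    rfl
  | succ n ih =>
    intro a
    rw [PySem.List.pyRange_one_cons (by push_cast; omega : a < a + ((n + 1 : Nat) : Int))]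
    show pvRayA board player _ (a :: PySem.List.pyRange (a + 1) (a + ((n + 1 : Nat) : Int)) 1) = _
    have hr : PySem.List.pyRange (a + 1) (a + ((n + 1 : Nat) : Int)) 1
        = PySem.List.pyRange (a + 1) ((a + 1) + (n : Int)) 1 := by
      congr 1; push_cast; ring
    have hx : x + dx * a + dx = x + dx * (a + 1) := by ring
    have hy : y + dy * a + dy = y + dy * (a + 1) := by ring
    simp only [pvRayA, pvWalk, hr, hx, hy, ih (a + 1)]

-- range(m) equals range(toNat m) (empty for negative m)
lemma pyRange_toNat (m : Int) :
    PySem.List.pyRange 0 m 1 = PySem.List.pyRange 0 ((0 : Int) + (m.toNat : Int)) 1 := by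
  rcases Int.lt_or_le m 0 with h | h
  · rw [PySem.List.pyRange_one_eq_nil (by omega), PySem.List.pyRange_one_eq_nil (by omega)]
  · rw [Int.toNat_of_nonneg h]; norm_num

-- shifting an integer range by one
lemma pyRange_shift_nat (k : Nat) : ∀ a : Int,
    PySem.List.pyRange (a + 1) (a + 1 + (k : Int)) 1
      = (PySem.List.pyRange a (a + (k : Int)) 1).map (· + 1) := by
  induction k with
  | zero =>
    intro a
    rw [show a + ((0 : Nat) : Int) = a by simp, show a + 1 + ((0 : Nat) : Int) = a + 1 by simp,
        PySem.List.pyRange_one_eq_nil (le_refl a), PySem.List.pyRange_one_eq_nil (le_refl (a + 1))]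
    rfl
  | succ n ih =>
    intro a
    rw [PySem.List.pyRange_one_cons (by push_cast; omega : a < a + ((n + 1 : Nat) : Int)),
        PySem.List.pyRange_one_cons (by push_cast; omega : a + 1 < a + 1 + ((n + 1 : Nat) : Int))]
    have h1 : PySem.List.pyRange (a + 1) (a + ((n + 1 : Nat) : Int)) 1
        = PySem.List.pyRange (a + 1) (a + 1 + (n : Int)) 1 := by congr 1; push_cast; ring
    have h2 : PySem.List.pyRange (a + 1 + 1) (a + 1 + ((n + 1 : Nat) : Int)) 1
        = PySem.List.pyRange (a + 1 + 1) (a + 1 + 1 + (n : Int)) 1 := by congr 1; push_cast; ring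
    simp only [List.map_cons, h1, h2, ih (a + 1)]

lemma pyRange_shift (a b : Int) :
    PySem.List.pyRange (a + 1) (b + 1) 1 = (PySem.List.pyRange a b 1).map (· + 1) := by
  rcases Int.lt_or_le b a with h | h
  · rw [PySem.List.pyRange_one_eq_nil (by omega), PySem.List.pyRange_one_eq_nil (by omega)]; rfl
  · have hb : b = a + ((b - a).toNat : Int) := by omega
    have hb1 : b + 1 = a + 1 + ((b - a).toNat : Int) := by omega
    rw [hb1, pyRange_shift_nat, ← hb]

-- a comprehension over 1..b, seen from one square further along the ray
lemma map_shift_cons (cx cy dx dy b : Int) (hb : 1 ≤ b) :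
    (PySem.List.pyRange 1 (b + 1) 1).map (fun t => (cx + dx * t, cy + dy * t))
      = (cx + dx, cy + dy) ::
        (PySem.List.pyRange 1 b 1).map (fun t => (cx + dx + dx * t, cy + dy + dy * t)) := by
  rw [PySem.List.pyRange_one_cons (by omega : (1 : Int) < b + 1),
      show ((1 : Int) + 1) = 1 + 1 from rfl, pyRange_shift 1 b]
  simp only [List.map_cons, List.map_map, mul_one]
  congr 1
  exact List.map_congr_left (fun t _ => by
    simp only [Function.comp, Prod.mk.injEq]
    constructor <;> ring)

-- unit directions: the two arithmetic facts the blocker scan needs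
lemma dir_key_iff (d a c : Int) (hd : d = 1 ∨ d = -1) : d * (a - c) = 1 ↔ a = c + d := by
  rcases hd with rfl | rfl <;> omega

lemma dir_shift (d a c : Int) (hd : d = 1 ∨ d = -1) :
    d * (a - (c + d)) = d * (a - c) - 1 := by
  rcases hd with rfl | rfl <;> ring

-- pvBest with an out-of-range edge returns the accumulator unchanged
lemma pvBest_edge_neg (cx cy dx dy edge : Int) (hedge : edge < 1) :
    ∀ (board : List (Int × Int × String)) (best : Option (Int × String)),
    pvBest cx cy dx dy edge board best = best := by
  intro board
  induction board with
  | nil => intro best; rfl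
  | cons e rest ih =>
    intro best
    simp only [pvBest]
    rw [if_neg (by rintro ⟨h1, h2, -⟩; omega)]
    exact ih best

-- once 'best' holds t = 1 it can never be replaced (strict <, t ≥ 1)
lemma pvBest_one_fixed (cx cy dx dy edge : Int) (s : String) :
    ∀ (board : List (Int × Int × String)),
    pvBest cx cy dx dy edge board (some (1, s)) = some (1, s) := by
  intro board
  induction board with
  | nil => rfl
  | cons e rest ih =>
    simp only [pvBest]
    split
    · next h =>
      rw [if_neg (by omega : ¬ dx * (e.1 - cx) < 1)]
      exact ih
    · exact ih

-- the result of pvBest starting from an in-range accumulator stays in range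
lemma pvBest_range (cx cy dx dy edge : Int) :
    ∀ (board : List (Int × Int × String)) (best : Option (Int × String)),
    (∀ p, best = some p → 1 ≤ p.1 ∧ p.1 ≤ edge) →
    ∀ q, pvBest cx cy dx dy edge board best = some q → 1 ≤ q.1 ∧ q.1 ≤ edge := by
  intro board
  induction board with
  | nil => intro best hb q hq; exact hb q hq
  | cons e rest ih =>
    rintro (_ | ⟨p⟩) hb q hq
    · simp only [pvBest] at hq
      split at hq
      · next h => exact ih _ (by rintro p' ⟨rfl⟩; exact ⟨h.1, h.2.1⟩) q hq
      · exact ih none hb q hq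
    · simp only [pvBest] at hq
      split at hq
      · next h =>
        split at hq
        · exact ih _ (by rintro p' ⟨rfl⟩; exact ⟨h.1, h.2.1⟩) q hq
        · exact ih _ hb q hq
      · exact ih _ hb q hq

-- if the adjacent square is occupied, pvBest finds it as the unique minimal blocker (t = 1)
lemma pvBest_adjacent (cx cy dx dy edge : Int) (hdx : dx = 1 ∨ dx = -1)
    (hdy : dy = 1 ∨ dy = -1) (hedge : 1 ≤ edge) (s : String) :
    ∀ (board : List (Int × Int × String)) (best : Option (Int × String)),
    pvLookupA board (cx + dx, cy + dy) = some s →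
    (∀ p, best = some p → 2 ≤ p.1) →
    pvBest cx cy dx dy edge board best = some (1, s) := by
  intro board
  induction board with
  | nil => intro best h _; simp [pvLookupA] at h
  | cons e rest ih =>
    intro best hlook hb
    by_cases hkey : e.1 = cx + dx ∧ e.2.1 = cy + dy
    · have hs : e.2.2 = s := by
        simp [pvLookupA, List.find?, hkey.1, hkey.2] at hlook; exact hlook
      have ht : dx * (e.1 - cx) = 1 := (dir_key_iff dx e.1 cx hdx).mpr hkey.1
      have hty : dy * (e.2.1 - cy) = 1 := (dir_key_iff dy e.2.1 cy hdy).mpr hkey.2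
      match best, hb with
      | none, _ =>
        simp only [pvBest]
        rw [if_pos ⟨by omega, by omega, by rw [hty, ht]⟩, ht, hs]
        exact pvBest_one_fixed cx cy dx dy edge s rest
      | some p, hb =>
        simp only [pvBest]
        rw [if_pos ⟨by omega, by omega, by rw [hty, ht]⟩,
            if_pos (by have := hb p rfl; omega), ht, hs]
        exact pvBest_one_fixed cx cy dx dy edge s rest
    · have hlook' : pvLookupA rest (cx + dx, cy + dy) = some s := by
        have : ¬ ((e.1 == cx + dx) && (e.2.1 == cy + dy)) = true := by
          simp only [Bool.and_eq_true, beq_iff_eq]; exact hkey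
        simpa [pvLookupA, List.find?, this] using hlook
      have hnot1 : ¬ (dx * (e.1 - cx) = 1 ∧ dy * (e.2.1 - cy) = 1) := by
        rintro ⟨h1, h2⟩
        exact hkey ⟨(dir_key_iff dx e.1 cx hdx).mp h1, (dir_key_iff dy e.2.1 cy hdy).mp h2⟩
      match best, hb with
      | none, _ =>
        simp only [pvBest]
        split
        · next h =>
          have hne : dx * (e.1 - cx) ≠ 1 := fun hh => hnot1 ⟨hh, by omega⟩
          exact ih _ hlook' (by rintro p' ⟨rfl⟩; omega)
        · exact ih none hlook' (by rintro p ⟨⟩)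
      | some p, hb =>
        simp only [pvBest]
        split
        · next h =>
          have hne : dx * (e.1 - cx) ≠ 1 := fun hh => hnot1 ⟨hh, by omega⟩
          split
          · exact ih _ hlook' (by rintro p' ⟨rfl⟩; omega)
          · exact ih _ hlook' hb
        · exact ih _ hlook' hb

-- if the adjacent square is free, pvBest at (cx, cy) is the shifted pvBest from (cx+dx, cy+dy)
lemma pvBest_shift (cx cy dx dy : Int) (n : Nat) (hdx : dx = 1 ∨ dx = -1)
    (hdy : dy = 1 ∨ dy = -1) :
    ∀ (board : List (Int × Int × String)) (best : Option (Int × String)),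
    pvLookupA board (cx + dx, cy + dy) = none →
    pvBest cx cy dx dy ((n : Int) + 1) board (best.map (fun p => (p.1 + 1, p.2)))
      = (pvBest (cx + dx) (cy + dy) dx dy (n : Int) board best).map (fun p => (p.1 + 1, p.2)) := by
  intro board
  induction board with
  | nil => intro best _; rfl
  | cons e rest ih =>
    intro best hlook
    have hkey : ¬ (e.1 = cx + dx ∧ e.2.1 = cy + dy) := by
      intro h
      simp [pvLookupA, List.find?, h.1, h.2] at hlook
    have hlook' : pvLookupA rest (cx + dx, cy + dy) = none := by
      have : ¬ ((e.1 == cx + dx) && (e.2.1 == cy + dy)) = true := by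
        simp only [Bool.and_eq_true, beq_iff_eq]; exact hkey
      simpa [pvLookupA, List.find?, this] using hlook
    have hnot1 : ¬ (dx * (e.1 - cx) = 1 ∧ dy * (e.2.1 - cy) = 1) := by
      rintro ⟨h1, h2⟩
      exact hkey ⟨(dir_key_iff dx e.1 cx hdx).mp h1, (dir_key_iff dy e.2.1 cy hdy).mp h2⟩
    have htshift : dx * (e.1 - (cx + dx)) = dx * (e.1 - cx) - 1 := dir_shift dx e.1 cx hdx
    have hyshift : dy * (e.2.1 - (cy + dy)) = dy * (e.2.1 - cy) - 1 := dir_shift dy e.2.1 cy hdy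
    have hcond : (1 ≤ dx * (e.1 - cx) ∧ dx * (e.1 - cx) ≤ (n : Int) + 1 ∧
                  dy * (e.2.1 - cy) = dx * (e.1 - cx))
        ↔ (1 ≤ dx * (e.1 - (cx + dx)) ∧ dx * (e.1 - (cx + dx)) ≤ (n : Int) ∧
           dy * (e.2.1 - (cy + dy)) = dx * (e.1 - (cx + dx))) := by
      rw [htshift, hyshift]
      constructor
      · rintro ⟨h1, h2, h3⟩
        have hne : dx * (e.1 - cx) ≠ 1 := fun hh => hnot1 ⟨hh, by omega⟩
        exact ⟨by omega, by omega, by omega⟩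
      · rintro ⟨h1, h2, h3⟩; exact ⟨by omega, by omega, by omega⟩
    have hval : dx * (e.1 - cx) = dx * (e.1 - (cx + dx)) + 1 := by omega
    match best with
    | none =>
      simp only [Option.map_none, pvBest]
      by_cases h : 1 ≤ dx * (e.1 - (cx + dx)) ∧ dx * (e.1 - (cx + dx)) ≤ (n : Int) ∧
          dy * (e.2.1 - (cy + dy)) = dx * (e.1 - (cx + dx))
      · rw [if_pos h, if_pos (hcond.mpr h), hval]
        have := ih (some (dx * (e.1 - (cx + dx)), e.2.2)) hlook'
        simpa using this
      · rw [if_neg h, if_neg (fun hc => h (hcond.mp hc))]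
        simpa using ih none hlook'
    | some p =>
      simp only [Option.map_some, pvBest]
      by_cases h : 1 ≤ dx * (e.1 - (cx + dx)) ∧ dx * (e.1 - (cx + dx)) ≤ (n : Int) ∧
          dy * (e.2.1 - (cy + dy)) = dx * (e.1 - (cx + dx))
      · rw [if_pos h, if_pos (hcond.mpr h), hval]
        by_cases hlt : dx * (e.1 - (cx + dx)) < p.1
        · rw [if_pos hlt, if_pos (by omega : dx * (e.1 - (cx + dx)) + 1 < p.1 + 1)]
          simpa using ih (some (dx * (e.1 - (cx + dx)), e.2.2)) hlook'
        · rw [if_neg hlt, if_neg (by omega : ¬ dx * (e.1 - (cx + dx)) + 1 < p.1 + 1)]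
          simpa using ih (some p) hlook'
      · rw [if_neg h, if_neg (fun hc => h (hcond.mp hc))]
        simpa using ih (some p) hlook'

-- the counted walk equals B's blocker-then-generate form
lemma walk_eq_dir (board : List (Int × Int × String)) (player : String)
    (dx dy : Int) (hdx : dx = 1 ∨ dx = -1) (hdy : dy = 1 ∨ dy = -1) :
    ∀ (n : Nat) (cx cy : Int),
    pvWalk board player dx dy n cx cy = pvDirB board player cx cy dx dy (n : Int) := by
  intro n
  induction n with
  | zero =>
    intro cx cy
    unfold pvDirB
    rw [pvBest_edge_neg cx cy dx dy ((0 : Nat) : Int) (by omega) board none]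
    rw [show ((0 : Nat) : Int) + 1 = 1 by norm_num, PySem.List.pyRange_one_eq_nil (by omega)]
    rfl
  | succ n ih =>
    intro cx cy
    unfold pvDirB
    cases hlook : pvLookupA board (cx + dx, cy + dy) with
    | some s =>
      rw [pvBest_adjacent cx cy dx dy (((n + 1 : Nat) : Int)) hdx hdy (by push_cast; omega)
          s board none hlook (by rintro p ⟨⟩)]
      simp only [pvWalk, hlook, PySem.List.pyRange_one_eq_nil (le_refl (1 : Int)),
        List.map_nil, List.nil_append]
      cases PySem.Str.pyGet? s 0 with
      | none => rfl
      | some ch =>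
        simp only [mul_one]
    | none =>
      have hshift := pvBest_shift cx cy dx dy n hdx hdy board none hlook
      simp only [Option.map_none] at hshift
      have hcast : ((n + 1 : Nat) : Int) = (n : Int) + 1 := by push_cast; ring
      rw [hcast, hshift]
      simp only [pvWalk, hlook, ih (cx + dx) (cy + dy)]
      unfold pvDirB
      cases hbest : pvBest (cx + dx) (cy + dy) dx dy (n : Int) board none with
      | none =>
        simp only [Option.map_none]
        rw [map_shift_cons cx cy dx dy ((n : Int) + 1) (by omega)]
      | some p =>
        obtain ⟨t0, s⟩ := p
        have ht0 : 1 ≤ t0 ∧ t0 ≤ (n : Int) :=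
          pvBest_range (cx + dx) (cy + dy) dx dy (n : Int) board none
            (by rintro p ⟨⟩) (t0, s) hbest
        simp only [Option.map_some]
        rw [map_shift_cons cx cy dx dy t0 ht0.1,
            show cx + dx * (t0 + 1) = cx + dx + dx * t0 by ring,
            show cy + dy * (t0 + 1) = cy + dy + dy * t0 by ring]
        rfl

-- one of A's blocks in terms of B's direction function
lemma dirB_toNat (board : List (Int × Int × String)) (player : String) (x y dx dy m : Int) :
    pvDirB board player x y dx dy ((m.toNat : Int)) = pvDirB board player x y dx dy m := by
  rcases Int.lt_or_le m 0 with h | h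
  case inr => rw [Int.toNat_of_nonneg h]
  case inl =>
    unfold pvDirB
    rw [pvBest_edge_neg x y dx dy _ (by omega), pvBest_edge_neg x y dx dy _ (by omega : m < 1),
        PySem.List.pyRange_one_eq_nil (by omega), PySem.List.pyRange_one_eq_nil (by omega)]

lemma block_eq (board : List (Int × Int × String)) (player : String)
    (dx dy x y m : Int) (hdx : dx = 1 ∨ dx = -1) (hdy : dy = 1 ∨ dy = -1)
    (pos : Int → Int × Int)
    (hpos : pos = fun i => (x + dx * (i + 1), y + dy * (i + 1))) :
    pvRayA board player pos (PySem.List.pyRange 0 m 1)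
      = pvDirB board player x y dx dy m := by
  rw [hpos, pyRange_toNat]
  have h1 := ray_eq_walk board player dx dy x y m.toNat 0
  have h2 := walk_eq_dir board player dx dy hdx hdy m.toNat (x + dx * 0) (y + dy * 0)
  rw [h1, h2]
  simp only [mul_zero, add_zero]
  exact dirB_toNat board player x y dx dy m

-- ===== VERDICT (by name: the statement is the Claim_ definition above) =====
theorem diagonal_moves_spec : Claim_equal_diagonal_moves := by
  intro coords board player _ _
  unfold Spec_diagonal_moves diagonal_moves diagonal_moves_alt
  simp only [List.foldl]
  norm_num
  rw [block_eq board player (-1) (-1) coords.1 coords.2 _ (Or.inr rfl) (Or.inr rfl) _ (by funext i; simp; constructor <;> ring),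
      block_eq board player 1 (-1) coords.1 coords.2 _ (Or.inl rfl) (Or.inr rfl) _ (by funext i; simp; constructor <;> ring),
      block_eq board player (-1) 1 coords.1 coords.2 _ (Or.inr rfl) (Or.inl rfl) _ (by funext i; simp; constructor <;> ring),
      block_eq board player 1 1 coords.1 coords.2 _ (Or.inl rfl) (Or.inl rfl) _ (by funext i; simp; constructor <;> ring)]
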